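-- pv_equiv track=rewrite | github.com/renjieliu/personal_projects | googlecodejam/0. copy_from_google_jam_archive/2021/Round 1C 2021/2.py | f
-- ===== SOURCE A (Python) =====
-- def f(n, lkp):
--     if n >= lkp[-1]:
--         return 0
--     s = 0
--     e = len(lkp)-1
--     while s <= e:
--         mid = (s+e)//2
--         if lkp[mid] <= n:
--             s = mid + 1
--         elif lkp[mid] > n:
--             e = mid - 1
--
--     return lkp[s]
-- ===== SOURCE B (Python) =====
-- def f(n, lkp):
--     if n >= lkp[-1]:
--         return 0
--     for x in lkp:
--         if x > n:
--             return x
-- ===== Notes on version B (the rewrite author's own statement) =====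
-- stated objective: simpler
-- what changed: The hand-written binary-search loop is replaced by a single forward linear scan returning the first element greater than n (the leading guard is kept verbatim).
-- outside the precondition, e.g. on f(1, [5, 0, 3]): A returns 3, B returns 5
import Mathlib
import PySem

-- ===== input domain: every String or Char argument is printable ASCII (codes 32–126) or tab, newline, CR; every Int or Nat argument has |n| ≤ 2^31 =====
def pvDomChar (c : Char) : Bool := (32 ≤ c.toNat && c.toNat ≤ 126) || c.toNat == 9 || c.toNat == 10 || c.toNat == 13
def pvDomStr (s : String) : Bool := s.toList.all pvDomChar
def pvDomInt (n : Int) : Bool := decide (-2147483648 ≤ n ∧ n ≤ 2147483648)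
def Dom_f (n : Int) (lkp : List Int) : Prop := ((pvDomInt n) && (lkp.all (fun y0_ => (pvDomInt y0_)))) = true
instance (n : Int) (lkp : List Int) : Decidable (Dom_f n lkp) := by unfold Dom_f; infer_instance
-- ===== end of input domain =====

-- B keeps A's leading guard but replaces the binary search by a forward linear scan (objective: simpler).

-- ===== PORT A =====
-- A's while-loop: state (s, e), mid = (s+e)//2 with Python floor division
def fLoop (n : Int) (lkp : List Int) (s e : Int) : Int :=
  if _h : s ≤ e then
    let mid := PySem.Int.floordiv (s + e) 2
    if PySem.List.pyGetD lkp mid 0 ≤ n then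
      fLoop n lkp (mid + 1) e
    else
      fLoop n lkp s (mid - 1)
  else
    PySem.List.pyGetD lkp s 0
termination_by (e + 1 - s).toNat
decreasing_by
  · have := PySem.Int.floordiv_two_mid_bounds (lo := s) (hi := e) _h
    omega
  · have := PySem.Int.floordiv_two_mid_bounds (lo := s) (hi := e) _h
    omega

def f (n : Int) (lkp : List Int) : Int :=
  if n ≥ PySem.List.pyGetD lkp (-1) 0 then 0
  else fLoop n lkp 0 ((lkp.length : Int) - 1)

-- ===== PORT B =====
-- 'for x in lkp: if x > n: return x' (falling off the loop is unreachable under the guard;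
-- the 0 there is a Lean-side default for totality)
def scanGt (n : Int) : List Int → Int
  | [] => 0
  | x :: xs => if x > n then x else scanGt n xs

def f_alt (n : Int) (lkp : List Int) : Int :=
  if n ≥ PySem.List.pyGetD lkp (-1) 0 then 0
  else scanGt n lkp

-- ===== PRECONDITION & SPEC =====
-- Pre_ excludes the empty list, on which A raises IndexError at lkp[-1], and unsorted lists whose
-- last element exceeds n (when the last element is ≤ n both return 0 whatever the order, so those
-- stay inside): on an unsorted list the value picked by A's binary search is accidental
-- (garbage-in for a binary search) and B's first-match scan is an equally defensible choice.
def Pre_f (n : Int) (lkp : List Int) : Prop :=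
  lkp ≠ [] ∧ (List.Pairwise (· ≤ ·) lkp ∨ lkp.getLast?.getD 0 ≤ n)
instance (n : Int) (lkp : List Int) : Decidable (Pre_f n lkp) := by unfold Pre_f; infer_instance

def pvWitness_f : Int × List Int := (2, [1, 3, 5])

def Spec_f (n : Int) (lkp : List Int) (out : Int) : Prop := out = f_alt n lkp
instance (n : Int) (lkp : List Int) (out : Int) : Decidable (Spec_f n lkp out) := by unfold Spec_f; infer_instance

-- ===== CLAIM (what is proved, stated in full; the proofs are below) =====
def Claim_equal_f : Prop := ∀ (n : Int) (lkp : List Int), Dom_f n lkp → Pre_f n lkp → Spec_f n lkp (f n lkp)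

-- ===== LEMMAS AND PROOFS =====

-- the scan returns lkp[k] when k is the first index whose element exceeds n
theorem scanGt_eq_of_first (n : Int) (lkp : List Int) (k : Nat) (hk : k < lkp.length)
    (hlow : ∀ i : Nat, i < k → lkp.getD i 0 ≤ n) (hgt : n < lkp.getD k 0) :
    scanGt n lkp = lkp.getD k 0 := by
  induction lkp generalizing k with
  | nil => simp at hk
  | cons x xs ih =>
    cases k with
    | zero =>
      simp only [List.getD_cons_zero] at hgt ⊢
      simp [scanGt, hgt]
    | succ k =>
      have hx : x ≤ n := by simpa using hlow 0 (Nat.succ_pos k)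
      simp only [List.getD_cons_succ] at hgt ⊢
      rw [scanGt, if_neg (by omega)]
      exact ih k (by simpa using hk) (fun i hi => by simpa using hlow (i + 1) (by omega)) hgt

-- monotonicity of a non-decreasing list at Nat indices
theorem getD_mono_of_pairwise (lkp : List Int) (hsort : List.Pairwise (· ≤ ·) lkp)
    (i j : Nat) (hij : i ≤ j) (hj : j < lkp.length) : lkp.getD i 0 ≤ lkp.getD j 0 := by
  rcases Nat.eq_or_lt_of_le hij with rfl | hlt
  · exact le_refl _
  · have hi : i < lkp.length := lt_trans hlt hj
    have h := List.pairwise_iff_getElem.mp hsort i j hi hj hlt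
    rwa [List.getD_eq_getElem?_getD, List.getD_eq_getElem?_getD,
      List.getElem?_eq_getElem hi, List.getElem?_eq_getElem hj]

-- pyGetD at an in-range Int index equals getD at its Nat counterpart
theorem pyGetD_eq_getD_toNat (lkp : List Int) (i : Int) (h0 : 0 ≤ i)
    (hl : i < (lkp.length : Int)) : PySem.List.pyGetD lkp i 0 = lkp.getD i.toNat 0 := by
  rw [PySem.List.pyGetD_eq_getElem lkp 0 h0 hl, List.getD_eq_getElem?_getD,
    List.getElem?_eq_getElem (by omega), Option.getD_some]

-- loop invariant for A's binary search: on a sorted list whose last element exceeds n,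
-- the loop returns lkp[k] for a first index k with n < lkp[k]
theorem fLoop_spec (n : Int) (lkp : List Int) (hsort : List.Pairwise (· ≤ ·) lkp)
    (hlast : n < lkp.getD (lkp.length - 1) 0) :
    ∀ (m : Nat) (s e : Int), (e + 1 - s).toNat ≤ m →
    0 ≤ s → s ≤ e + 1 → s ≤ (lkp.length : Int) - 1 → e ≤ (lkp.length : Int) - 1 →
    (∀ i : Nat, i < lkp.length → (i : Int) < s → lkp.getD i 0 ≤ n) →
    (∀ i : Nat, i < lkp.length → e < (i : Int) → n < lkp.getD i 0) →
    ∃ k : Nat, k < lkp.length ∧ fLoop n lkp s e = lkp.getD k 0 ∧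
      (∀ i : Nat, i < k → lkp.getD i 0 ≤ n) ∧ n < lkp.getD k 0 := by
  intro m
  induction m with
  | zero =>
    intro s e hm hs0 hse1 hsl hel hlow hhigh
    have hexit : ¬ s ≤ e := by omega
    refine ⟨s.toNat, by omega, ?_, ?_, ?_⟩
    · rw [fLoop, dif_neg hexit, pyGetD_eq_getD_toNat lkp s hs0 (by omega)]
    · exact fun i hi => hlow i (by omega) (by omega)
    · exact hhigh s.toNat (by omega) (by omega)
  | succ m ih =>
    intro s e hm hs0 hse1 hsl hel hlow hhigh
    by_cases hin : s ≤ e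
    · have hb := PySem.Int.floordiv_two_mid_bounds (lo := s) (hi := e) hin
      set mid := PySem.Int.floordiv (s + e) 2 with hmiddef
      have hmid0 : 0 ≤ mid := by omega
      have hmidlen : mid < (lkp.length : Int) := by omega
      have hval : PySem.List.pyGetD lkp mid 0 = lkp.getD mid.toNat 0 :=
        pyGetD_eq_getD_toNat lkp mid hmid0 hmidlen
      rw [fLoop, dif_pos hin]
      simp only [← hmiddef]
      by_cases hcmp : PySem.List.pyGetD lkp mid 0 ≤ n
      · rw [if_pos hcmp]
        rw [hval] at hcmp
        -- lkp[mid] ≤ n, so mid cannot be the last index (last element exceeds n)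
        have hmidlast : mid < (lkp.length : Int) - 1 := by
          by_contra hcon
          have heq : mid.toNat = lkp.length - 1 := by omega
          rw [heq] at hcmp
          omega
        exact ih (mid + 1) e (by omega) (by omega) (by omega) (by omega) hel
          (fun i hi hilt => le_trans
            (getD_mono_of_pairwise lkp hsort i mid.toNat (by omega) (by omega)) hcmp)
          hhigh
      · rw [if_neg hcmp]
        rw [hval] at hcmp
        push Not at hcmp
        exact ih s (mid - 1) (by omega) hs0 (by omega) hsl (by omega) hlow
          (fun i hi hilt => lt_of_lt_of_le hcmp
            (getD_mono_of_pairwise lkp hsort mid.toNat i (by omega) hi))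
    · refine ⟨s.toNat, by omega, ?_, ?_, ?_⟩
      · rw [fLoop, dif_neg hin, pyGetD_eq_getD_toNat lkp s hs0 (by omega)]
      · exact fun i hi => hlow i (by omega) (by omega)
      · exact hhigh s.toNat (by omega) (by omega)

-- ===== VERDICT (by name: the statement is the Claim_ definition above) =====
theorem f_spec : Claim_equal_f := by
  intro n lkp _hdom hpre
  obtain ⟨hne, hdisj⟩ := hpre
  have hlen : 1 ≤ lkp.length := List.length_pos_iff.mpr hne
  show Spec_f n lkp (f n lkp)
  unfold Spec_f f f_alt
  by_cases hg : n ≥ PySem.List.pyGetD lkp (-1) 0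
  · rw [if_pos hg, if_pos hg]
  · rw [if_neg hg, if_neg hg]
    have hsort : List.Pairwise (· ≤ ·) lkp := by
      rcases hdisj with h | h
      · exact h
      · exfalso
        apply hg
        rw [PySem.List.pyGetD_neg_one lkp 0 hne]
        rwa [List.getLast?_eq_some_getLast hne, Option.getD_some] at h
    have hlastval : PySem.List.pyGetD lkp (-1) 0 = lkp.getD (lkp.length - 1) 0 := by
      rw [PySem.List.pyGetD_neg_one lkp 0 hne, List.getLast_eq_getElem,
        List.getD_eq_getElem?_getD, List.getElem?_eq_getElem (by omega), Option.getD_some]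
    have hlast : n < lkp.getD (lkp.length - 1) 0 := by
      rw [hlastval] at hg; omega
    obtain ⟨k, hk, heq, hlow, hgt⟩ :=
      fLoop_spec n lkp hsort hlast ((lkp.length : Int) - 1 + 1 - 0).toNat 0
        ((lkp.length : Int) - 1) (le_refl _) (by omega) (by omega) (by omega) (by omega)
        (fun i hi hilt => absurd hilt (by omega))
        (fun i hi hilt => absurd hilt (by omega))
    rw [heq, scanGt_eq_of_first n lkp k hk hlow hgt]
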